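-- pv_equiv track=rewrite | github.com/bctak/delphino | src/static_analysis.py | calls_library_function
-- ===== SOURCE A (Python) =====
-- def calls_library_function(func_name, user_functions, function_calls, visited):
--     """
--     Returns True if func_name (or anything it transitively calls) calls any library function.
--     """
--     if func_name not in function_calls:
--         # 함수 호출 내역이 없다면 라이브러리 호출도 없는 것으로 간주
--         return False
--
--     if func_name in visited:
--         return False  # 이미 방문한 함수는 다시 검사하지 않음 (무한 루프 방지)
--
--     visited.add(func_name)
--
--     for callee in function_calls[func_name]:
--         if callee not in user_functions:
--             return True  # 라이브러리 함수 호출 발견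
--         if calls_library_function(callee, user_functions, function_calls, visited):
--             return True  # 하위 호출 중 라이브러리 호출 발견
--
--     return False
-- ===== SOURCE B (Python) =====
-- def calls_library_function(func_name, user_functions, function_calls, visited):
--     """
--     Returns True if func_name (or anything it transitively calls) calls any library function.
--     Iterative DFS with an explicit stack of iterators instead of recursion; mutates
--     `visited` exactly as the recursive version does (same pre-order traversal).
--     """
--     if func_name not in function_calls:
--         return False
--     if func_name in visited:
--         return False
--     visited.add(func_name)
--     stack = [iter(function_calls[func_name])]
--     while stack:
--         try:
--             callee = next(stack[-1])
--         except StopIteration: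
--             stack.pop()
--             continue
--         if callee not in user_functions:
--             return True
--         if callee in function_calls and callee not in visited:
--             visited.add(callee)
--             stack.append(iter(function_calls[callee]))
--     return False
-- ===== Notes on version B (the rewrite author's own statement) =====
-- stated objective: alternative
-- what changed: Replaced the recursive DFS by an iterative DFS over an explicit stack of pending callee lists, preserving the exact pre-order traversal (and the identical mutation of the visited set).
import Mathlib
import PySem

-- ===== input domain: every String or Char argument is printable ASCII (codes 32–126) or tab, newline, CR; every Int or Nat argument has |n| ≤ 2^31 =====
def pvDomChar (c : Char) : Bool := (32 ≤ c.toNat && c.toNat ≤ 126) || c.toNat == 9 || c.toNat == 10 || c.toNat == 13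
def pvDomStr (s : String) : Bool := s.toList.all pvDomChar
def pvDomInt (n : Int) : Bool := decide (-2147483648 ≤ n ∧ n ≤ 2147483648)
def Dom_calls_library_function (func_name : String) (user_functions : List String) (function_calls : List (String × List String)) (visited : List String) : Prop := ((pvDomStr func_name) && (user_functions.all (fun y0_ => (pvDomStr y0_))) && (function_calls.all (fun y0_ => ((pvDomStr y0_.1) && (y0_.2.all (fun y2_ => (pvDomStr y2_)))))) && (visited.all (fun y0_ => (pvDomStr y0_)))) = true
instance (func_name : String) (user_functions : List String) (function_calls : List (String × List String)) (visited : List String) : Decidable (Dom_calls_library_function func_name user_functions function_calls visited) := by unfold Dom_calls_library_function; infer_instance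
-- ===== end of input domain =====

-- B replaces A's recursion by an iterative DFS over an explicit stack of pending callee
-- lists (same pre-order traversal, same return value; both Pythons mutate `visited`
-- identically, the equivalence proved here is about the return value).

-- ===== PORT A =====
-- number of dict entries whose key is not yet visited (termination measure / fuel bound)
def pvKeyCount (function_calls : List (String × List String)) (v : List String) : Nat :=
  (function_calls.filter (fun p => !(PySem.Set.contains v p.1))).length

-- the `for callee in function_calls[func_name]` loop of A, with `go` the recursive call
def pvLoopA (user_functions : List String)
    (go : String → PySem.Set String → Bool × PySem.Set String) :
    List String → PySem.Set String → Bool × PySem.Set String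
  | [], v => (false, v)
  | c :: cs, v =>
    if !(user_functions.contains c) then (true, v)
    else
      let r := go c v
      if r.1 then (true, r.2) else pvLoopA user_functions go cs r.2

-- A's recursion, with fuel as a totality guard only (fuel function_calls.length + 1 is
-- always sufficient: each recursive unfolding removes at least one dict entry's key from
-- the unvisited count); returns the result together with the mutated `visited` set.
def pvGoA (user_functions : List String) (function_calls : List (String × List String)) :
    Nat → String → PySem.Set String → Bool × PySem.Set String
  | 0, _, v => (false, v)
  | f + 1, name, v =>
    match (PySem.Dict.mk function_calls).get? name with
    | none => (false, v)
    | some callees =>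
      if PySem.Set.contains v name then (false, v)
      else pvLoopA user_functions (pvGoA user_functions function_calls f) callees
        (PySem.Set.add v name)

def calls_library_function (func_name : String) (user_functions : List String) (function_calls : List (String × List String)) (visited : List String) : Bool :=
  (pvGoA user_functions function_calls (function_calls.length + 1) func_name visited).1

-- ===== PORT B =====
-- termination-measure helper for the stack machine (needed by pvStepB's decreasing_by)
theorem pvKeyCount_add_lt (function_calls : List (String × List String)) (v : List String)
    (c : String) (h : ((PySem.Dict.mk function_calls).get? c).isSome)
    (hv : c ∉ v) :
    pvKeyCount function_calls (PySem.Set.add v c) < pvKeyCount function_calls v := by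
  obtain ⟨l, hl⟩ := Option.isSome_iff_exists.mp h
  have hmem : (c, l) ∈ function_calls := by
    simpa [PySem.Dict.items] using
      PySem.Dict.mem_items_of_get?_eq_some (d := PySem.Dict.mk function_calls) hl
  clear h hl
  unfold pvKeyCount
  induction function_calls with
  | nil => cases hmem
  | cons p ps ih =>
    have hmono : (ps.filter (fun q => !(PySem.Set.contains (PySem.Set.add v c) q.1))).length ≤
        (ps.filter (fun q => !(PySem.Set.contains v q.1))).length := by
      rw [← List.countP_eq_length_filter, ← List.countP_eq_length_filter]
      refine List.countP_mono_left (fun q _ hq => ?_)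
      simp only [Bool.not_eq_eq_eq_not, Bool.not_true] at hq ⊢
      simp only [PySem.Set.contains] at hq ⊢
      simp [PySem.Set.mem_add] at hq ⊢
      exact hq.1
    rcases List.mem_cons.mp hmem with heq | htail
    · have h1 : (!PySem.Set.contains v p.1) = true := by
        rw [← heq]; simp [PySem.Set.contains, hv]
      have h2 : (!PySem.Set.contains (PySem.Set.add v c) p.1) = false := by
        rw [← heq]; simp [PySem.Set.contains, PySem.Set.mem_add]
      simp only [List.filter_cons, h1, h2, if_true]
      simp only [Bool.false_eq_true, if_false, List.length_cons]
      omega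
    · have hlt := ih htail
      simp only [List.filter_cons] at hlt ⊢
      by_cases h1 : (!PySem.Set.contains (PySem.Set.add v c) p.1) = true
      · have h2 : (!PySem.Set.contains v p.1) = true := by
          simp only [PySem.Set.contains] at h1 ⊢
          simp [PySem.Set.mem_add] at h1 ⊢
          exact h1.1
        simp only [h1, h2, if_true, List.length_cons]
        omega
      · simp only [Bool.not_eq_true] at h1
        simp only [h1, Bool.false_eq_true, if_false]
        by_cases h2 : (!PySem.Set.contains v p.1) = true
        · rw [if_pos h2]; simp only [List.length_cons]; omega
        · rw [if_neg h2]; omega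

def pvStackSize (st : List (List String)) : Nat := st.foldr (fun fr a => fr.length + 1 + a) 0

-- B's while-loop: the stack holds, for each pushed iterator, its remaining callees
def pvStepB (user_functions : List String) (function_calls : List (String × List String)) :
    List (List String) → PySem.Set String → Bool
  | [], _ => false
  | [] :: stack, v => pvStepB user_functions function_calls stack v
  | (c :: cs) :: stack, v =>
    if !(user_functions.contains c) then true
    else
      match h : (PySem.Dict.mk function_calls).get? c with
      | some callees =>
        if hv : PySem.Set.contains v c then pvStepB user_functions function_calls (cs :: stack) v
        else pvStepB user_functions function_calls (callees :: cs :: stack) (PySem.Set.add v c)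
      | none => pvStepB user_functions function_calls (cs :: stack) v
  termination_by st v => (pvKeyCount function_calls v, pvStackSize st)
  decreasing_by
  · exact Prod.Lex.right _ (by simp [pvStackSize])
  · exact Prod.Lex.right _ (by simp [pvStackSize])
  · exact Prod.Lex.left _ _ (pvKeyCount_add_lt _ _ _ (by simp [h]) (by simpa using hv))
  · exact Prod.Lex.right _ (by simp [pvStackSize])

def calls_library_function_alt (func_name : String) (user_functions : List String) (function_calls : List (String × List String)) (visited : List String) : Bool :=
  match (PySem.Dict.mk function_calls).get? func_name with
  | none => false
  | some callees =>
    if PySem.Set.contains visited func_name then false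
    else pvStepB user_functions function_calls [callees] (PySem.Set.add visited func_name)

-- ===== PRECONDITION & SPEC =====
def Spec_calls_library_function (func_name : String) (user_functions : List String) (function_calls : List (String × List String)) (visited : List String) (out : Bool) : Prop := out = calls_library_function_alt func_name user_functions function_calls visited
instance (func_name : String) (user_functions : List String) (function_calls : List (String × List String)) (visited : List String) (out : Bool) : Decidable (Spec_calls_library_function func_name user_functions function_calls visited out) := by unfold Spec_calls_library_function; infer_instance

-- ===== CLAIM (what is proved, stated in full; the proofs are below) =====
def Claim_equal_calls_library_function : Prop := ∀ (func_name : String) (user_functions : List String) (function_calls : List (String × List String)) (visited : List String), Dom_calls_library_function func_name user_functions function_calls visited → Spec_calls_library_function func_name user_functions function_calls visited (calls_library_function func_name user_functions function_calls visited)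

-- ===== LEMMAS AND PROOFS =====
-- A's result `visited` set only grows
theorem pvLoopA_mono (uf : List String)
    (go : String → PySem.Set String → Bool × PySem.Set String)
    (hgo : ∀ n v x, x ∈ v → x ∈ (go n v).2) :
    ∀ (cs : List String) (v : PySem.Set String) (x : String),
      x ∈ v → x ∈ (pvLoopA uf go cs v).2 := by
  intro cs
  induction cs with
  | nil => intro v x hx; simpa [pvLoopA] using hx
  | cons c cs ih =>
    intro v x hx
    simp only [pvLoopA]
    split
    · simpa using hx
    · split
      · simpa using hgo c v x hx
      · exact ih _ _ (hgo c v x hx)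

theorem pvGoA_mono (uf : List String) (fc : List (String × List String)) :
    ∀ (f : Nat) (n : String) (v : PySem.Set String) (x : String),
      x ∈ v → x ∈ (pvGoA uf fc f n v).2 := by
  intro f
  induction f with
  | zero => intro n v x hx; simpa [pvGoA] using hx
  | succ f ih =>
    intro n v x hx
    simp only [pvGoA]
    rcases hget : (PySem.Dict.mk fc).get? n with _ | callees
    · simp only [hget]; simpa using hx
    · simp only [hget]
      split
      · simpa using hx
      · exact pvLoopA_mono uf _ (fun n' v' x' => ih n' v' x') callees _ x
          (by simp only [PySem.Set.mem_add]; exact Or.inl hx)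

theorem pvKeyCount_mono (fc : List (String × List String)) (v v' : List String)
    (h : ∀ x, x ∈ v → x ∈ v') : pvKeyCount fc v' ≤ pvKeyCount fc v := by
  unfold pvKeyCount
  rw [← List.countP_eq_length_filter, ← List.countP_eq_length_filter]
  refine List.countP_mono_left (fun q _ hq => ?_)
  simp only [Bool.not_eq_eq_eq_not, Bool.not_true] at hq ⊢
  simp only [PySem.Set.contains] at hq ⊢
  simp at hq ⊢
  exact fun hm => hq (h _ hm)

theorem pvKeyCount_le (fc : List (String × List String)) (v : List String) :
    pvKeyCount fc v ≤ fc.length := by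
  exact List.length_filter_le _ _

-- simulation: one stack frame of B computes exactly A's loop over that callee list
theorem pvSim (uf : List String) (fc : List (String × List String)) :
    ∀ (f : Nat) (cs : List String) (stack : List (List String)) (v : PySem.Set String),
      pvKeyCount fc v ≤ f →
      pvStepB uf fc (cs :: stack) v =
        (if (pvLoopA uf (pvGoA uf fc f) cs v).1 then true
         else pvStepB uf fc stack (pvLoopA uf (pvGoA uf fc f) cs v).2) := by
  intro f
  induction f using Nat.strong_induction_on with
  | _ f ihf =>
  intro cs
  induction cs with
  | nil => intro stack v _; simp [pvStepB, pvLoopA]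
  | cons c cs ihcs =>
    intro stack v hk
    by_cases hc : uf.contains c = true
    · rcases hget : (PySem.Dict.mk fc).get? c with _ | callees
      · -- callee has no recorded calls: A's recursive call returns false at once, B skips
        have hgo : pvGoA uf fc f c v = (false, v) := by
          cases f <;> simp [pvGoA, hget]
        rw [pvStepB]
        simp only [hc, Bool.not_true, Bool.false_eq_true, if_false]
        split
        · next _ heq => rw [hget] at heq; cases heq
        · rw [ihcs stack v hk]
          simp only [pvLoopA, hc, Bool.not_true, Bool.false_eq_true, if_false, hgo]
      · by_cases hv : PySem.Set.contains v c = true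
        · -- already visited: A's recursive call returns false, B does not push
          have hgo : pvGoA uf fc f c v = (false, v) := by
            cases f with
            | zero => simp [pvGoA]
            | succ f => simp only [pvGoA, hget]; rw [if_pos hv]
          rw [pvStepB]
          simp only [hc, Bool.not_true, Bool.false_eq_true, if_false]
          split
          · rw [dif_pos hv]
            rw [ihcs stack v hk]
            simp only [pvLoopA, hc, Bool.not_true, Bool.false_eq_true, if_false, hgo]
          · next heq => rw [hget] at heq; cases heq
        · -- unvisited user function with recorded calls: A recurses, B pushes a frame
          have hsome : ((PySem.Dict.mk fc).get? c).isSome := by simp [hget]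
          have hnotmem : c ∉ v := by
            intro hm; exact hv (by simp [PySem.Set.contains, hm])
          have hlt := pvKeyCount_add_lt fc v c hsome hnotmem
          obtain ⟨f', rfl⟩ : ∃ f', f = f' + 1 := ⟨f - 1, by omega⟩
          rw [pvStepB]
          simp only [hc, Bool.not_true, Bool.false_eq_true, if_false]
          have hvb : ¬ (PySem.Set.contains v c = true) := hv
          split
          case h_2 heq => rw [hget] at heq; cases heq
          case h_1 callees' heq =>
          rw [hget] at heq; injection heq with hce; subst hce
          rw [dif_neg hvb]
          rw [ihf f' (by omega) callees (cs :: stack) (PySem.Set.add v c) (by omega)]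
          have hgo : pvGoA uf fc (f' + 1) c v =
              pvLoopA uf (pvGoA uf fc f') callees (PySem.Set.add v c) := by
            simp only [pvGoA, hget]; rw [if_neg hvb]
          set r := pvLoopA uf (pvGoA uf fc f') callees (PySem.Set.add v c) with hr
          have hloop : pvLoopA uf (pvGoA uf fc (f' + 1)) (c :: cs) v =
              (if r.1 then (true, r.2) else pvLoopA uf (pvGoA uf fc (f' + 1)) cs r.2) := by
            simp only [pvLoopA, hc, Bool.not_true, Bool.false_eq_true, if_false, hgo]
          rcases hb : r.1 with _ | _
          · have hsub : ∀ x, x ∈ v → x ∈ r.2 := fun x hx => by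
              rw [hr]
              exact pvLoopA_mono uf _ (pvGoA_mono uf fc f') callees _ x
                (by simp only [PySem.Set.mem_add]; exact Or.inl hx)
            have hk2 : pvKeyCount fc r.2 ≤ f' + 1 :=
              le_trans (pvKeyCount_mono fc v r.2 hsub) hk
            simp only [hb, Bool.false_eq_true, if_false]
            rw [ihcs stack r.2 hk2, hloop]
            simp only [hb, Bool.false_eq_true, if_false]
          · simp only [hb, if_true]
            rw [hloop]
            simp only [hb, if_true]
    · -- library callee: both sides are immediately true
      have hc' : (!uf.contains c) = true := by simpa using hc
      rw [pvStepB, if_pos hc']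
      simp only [pvLoopA]
      rw [if_pos hc']
      simp

-- ===== VERDICT (by name: the statement is the Claim_ definition above) =====
theorem calls_library_function_spec : Claim_equal_calls_library_function := by
  intro fn uf fc v _
  unfold Spec_calls_library_function calls_library_function calls_library_function_alt
  rcases hget : (PySem.Dict.mk fc).get? fn with _ | callees
  · simp [pvGoA, hget]
  · simp only [pvGoA, hget]
    by_cases hv : PySem.Set.contains v fn = true
    · rw [if_pos hv, if_pos hv]
    · rw [if_neg hv, if_neg hv]
      have hnotmem : fn ∉ v := by
        intro hm; exact hv (by simp [PySem.Set.contains, hm])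
      have hlt := pvKeyCount_add_lt fc v fn (by simp [hget]) hnotmem
      have hle := pvKeyCount_le fc v
      rw [pvSim uf fc fc.length callees [] (PySem.Set.add v fn) (by omega)]
      rcases hb : (pvLoopA uf (pvGoA uf fc fc.length) callees (PySem.Set.add v fn)).1 with _ | _
      · simp only [hb, Bool.false_eq_true, if_false]
        rw [pvStepB]
      · simp only [hb, if_true]
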